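-- pv_equiv track=rewrite | github.com/ramihatou97/neurosynth-unified | src/library/scanner.py | _detect_evidence_level
-- ===== SOURCE A (Python) =====
-- from enum import Enum
-- from typing import List, Optional, Dict, Any, Set, Tuple, Callable
--
-- class DocumentType(str, Enum):
--     """Type of reference document."""
--     TEXTBOOK = "textbook"
--     ATLAS = "atlas"
--     HANDBOOK = "handbook"
--     JOURNAL_ARTICLE = "journal_article"
--     REVIEW = "review"
--     CASE_SERIES = "case_series"
--     GUIDELINES = "guidelines"
--     EXAM_QUESTIONS = "exam_questions"
--     COURSE_MATERIAL = "course_material"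
--     LECTURE_NOTES = "lecture_notes"
--     OPERATIVE_VIDEO_COMPANION = "operative_video_companion"
--     CHAPTER = "chapter"
--     UNKNOWN = "unknown"
--
-- EVIDENCE_LEVEL_PATTERNS: Dict[str, List[str]] = {
--     "Ia": ["meta-analysis", "systematic review", "cochrane"],
--     "Ib": ["randomized controlled trial", "rct", "double-blind", "placebo-controlled"],
--     "IIa": ["prospective cohort", "controlled trial without randomization"],
--     "IIb": ["cohort study", "case-control", "retrospective cohort"],
--     "III": ["case series", "comparative study", "observational"],
--     "IV": ["case report", "expert opinion", "editorial", "review article"],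
-- }
--
-- def _detect_evidence_level(text: str, document_type: DocumentType) -> Optional[str]:
--     """
--     Detect evidence level for journal articles and reviews.
--
--     Args:
--         text: Text content to analyze (title, abstract, metadata)
--         document_type: Type of document
--
--     Returns:
--         Evidence level (Ia, Ib, IIa, IIb, III, IV) or None
--     """
--     # Only detect for journal articles, reviews, and case series
--     if document_type not in [DocumentType.JOURNAL_ARTICLE, DocumentType.REVIEW, DocumentType.CASE_SERIES]:
--         return None
--
--     text_lower = text.lower()
--
--     # Check patterns in order of evidence strength (highest first)
--     for level in ["Ia", "Ib", "IIa", "IIb", "III", "IV"]: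
--         patterns = EVIDENCE_LEVEL_PATTERNS.get(level, [])
--         if any(pattern in text_lower for pattern in patterns):
--             return level
--
--     # Default to IV for journal articles without clear evidence markers
--     if document_type == DocumentType.JOURNAL_ARTICLE:
--         return "IV"
--
--     return None
-- ===== SOURCE B (Python) =====
-- # Flat (pattern, rank, level) table + single fold with a running best-rank accumulator;
-- # no dict, no per-level inner any(), no early return.
-- _PATTERN_TABLE = [
--     ("meta-analysis", 0, "Ia"), ("systematic review", 0, "Ia"), ("cochrane", 0, "Ia"),
--     ("randomized controlled trial", 1, "Ib"), ("rct", 1, "Ib"),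
--     ("double-blind", 1, "Ib"), ("placebo-controlled", 1, "Ib"),
--     ("prospective cohort", 2, "IIa"), ("controlled trial without randomization", 2, "IIa"),
--     ("cohort study", 3, "IIb"), ("case-control", 3, "IIb"), ("retrospective cohort", 3, "IIb"),
--     ("case series", 4, "III"), ("comparative study", 4, "III"), ("observational", 4, "III"),
--     ("case report", 5, "IV"), ("expert opinion", 5, "IV"),
--     ("editorial", 5, "IV"), ("review article", 5, "IV"),
-- ]
--
--
-- def _detect_evidence_level(text, document_type):
--     if document_type not in ("journal_article", "review", "case_series"):
--         return None
--     text_lower = text.lower()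
--     best = None  # (rank, level) of the strongest pattern seen so far
--     for pattern, rank, level in _PATTERN_TABLE:
--         if (best is None or rank < best[0]) and pattern in text_lower:
--             best = (rank, level)
--     if best is not None:
--         return best[1]
--     return "IV" if document_type == "journal_article" else None
-- ===== Notes on version B (the rewrite author's own statement) =====
-- stated objective: alternative
-- what changed: Replaces the per-level loop over a dict of pattern lists (inner any() with early return) by a single fold over one flat (pattern, rank, level) table maintaining a running best-rank accumulator; the dict, the level list, the inner any() and the early return all disappear.
import Mathlib
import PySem

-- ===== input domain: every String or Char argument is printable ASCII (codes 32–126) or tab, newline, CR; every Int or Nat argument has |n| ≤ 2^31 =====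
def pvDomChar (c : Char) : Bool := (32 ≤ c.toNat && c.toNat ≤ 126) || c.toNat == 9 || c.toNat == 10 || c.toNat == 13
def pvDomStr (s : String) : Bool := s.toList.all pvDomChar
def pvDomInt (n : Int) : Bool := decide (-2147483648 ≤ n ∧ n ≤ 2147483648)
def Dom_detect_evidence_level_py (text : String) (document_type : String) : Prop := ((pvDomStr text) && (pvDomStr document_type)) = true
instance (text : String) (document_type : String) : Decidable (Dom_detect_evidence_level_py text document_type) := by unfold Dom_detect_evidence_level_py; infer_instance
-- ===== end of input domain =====

-- B replaces A's per-level dict scan (inner any() with early return) by one fold over a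
-- flat (pattern, rank, level) table with a running best-rank accumulator (objective: alternative, same cost).

-- ===== PORT A =====
def pvEvidencePatterns : PySem.Dict String (List String) := PySem.Dict.ofList
  [("Ia", ["meta-analysis", "systematic review", "cochrane"]),
   ("Ib", ["randomized controlled trial", "rct", "double-blind", "placebo-controlled"]),
   ("IIa", ["prospective cohort", "controlled trial without randomization"]),
   ("IIb", ["cohort study", "case-control", "retrospective cohort"]),
   ("III", ["case series", "comparative study", "observational"]),
   ("IV", ["case report", "expert opinion", "editorial", "review article"])]

-- any(pattern in text_lower for pattern in EVIDENCE_LEVEL_PATTERNS.get(level, []))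
def pvHit (text_lower level : String) : Bool :=
  ((PySem.Dict.get? pvEvidencePatterns level).getD []).any (fun p => PySem.Str.isIn p text_lower)

-- A's for-loop with early return
def pvScanA (text_lower : String) : List String → Option String
  | [] => none
  | level :: rest => if pvHit text_lower level then some level else pvScanA text_lower rest

def detect_evidence_level_py (text : String) (document_type : String) : Option String :=
  if !(document_type == "journal_article" || document_type == "review" || document_type == "case_series") then
    none
  else
    let text_lower := PySem.Str.lower text
    match pvScanA text_lower ["Ia", "Ib", "IIa", "IIb", "III", "IV"] with
    | some level => some level
    | none => if document_type == "journal_article" then some "IV" else none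

-- ===== PORT B =====
-- Source B's flat _PATTERN_TABLE
def pvFlatTable : List (String × Nat × String) :=
  [("meta-analysis", 0, "Ia"), ("systematic review", 0, "Ia"), ("cochrane", 0, "Ia"),
   ("randomized controlled trial", 1, "Ib"), ("rct", 1, "Ib"),
   ("double-blind", 1, "Ib"), ("placebo-controlled", 1, "Ib"),
   ("prospective cohort", 2, "IIa"), ("controlled trial without randomization", 2, "IIa"),
   ("cohort study", 3, "IIb"), ("case-control", 3, "IIb"), ("retrospective cohort", 3, "IIb"),
   ("case series", 4, "III"), ("comparative study", 4, "III"), ("observational", 4, "III"),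
   ("case report", 5, "IV"), ("expert opinion", 5, "IV"),
   ("editorial", 5, "IV"), ("review article", 5, "IV")]

-- the loop body: if (best is None or rank < best[0]) and pattern in text_lower: best = (rank, level)
def pvStep (text_lower : String) (best : Option (Nat × String)) (e : String × Nat × String) : Option (Nat × String) :=
  if (match best with | none => true | some bp => decide (e.2.1 < bp.1)) && PySem.Str.isIn e.1 text_lower
  then some (e.2.1, e.2.2) else best

def detect_evidence_level_py_alt (text : String) (document_type : String) : Option String :=
  if !(document_type == "journal_article" || document_type == "review" || document_type == "case_series") then
    none
  else
    let text_lower := PySem.Str.lower text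
    match pvFlatTable.foldl (pvStep text_lower) none with
    | some bp => some bp.2
    | none => if document_type == "journal_article" then some "IV" else none

-- ===== PRECONDITION & SPEC =====
def Spec_detect_evidence_level_py (text : String) (document_type : String) (out : Option String) : Prop := out = detect_evidence_level_py_alt text document_type
instance (text : String) (document_type : String) (out : Option String) : Decidable (Spec_detect_evidence_level_py text document_type out) := by unfold Spec_detect_evidence_level_py; infer_instance

-- ===== CLAIM (what is proved, stated in full; the proofs are below) =====
def Claim_equal_detect_evidence_level_py : Prop := ∀ (text : String) (document_type : String), Dom_detect_evidence_level_py text document_type → Spec_detect_evidence_level_py text document_type (detect_evidence_level_py text document_type)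

-- ===== LEMMAS AND PROOFS =====

-- once best has rank j and every remaining rank is ≥ j, the fold never updates
theorem pvStep_skip (tl : String) (prs : List (String × Nat × String)) (j : Nat) (l : String)
    (h : ∀ e ∈ prs, j ≤ e.2.1) :
    prs.foldl (pvStep tl) (some (j, l)) = some (j, l) := by
  induction prs with
  | nil => rfl
  | cons e t ih =>
    have hj : j ≤ e.2.1 := h e (by simp)
    have hs : pvStep tl (some (j, l)) e = some (j, l) := by
      simp [pvStep, Nat.not_lt.mpr hj]
    rw [List.foldl_cons, hs]
    exact ih (fun e he => h e (by simp [he]))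

-- folding from none through one constant-rank group then a rest of ranks ≥ r
theorem pvGroupFold (tl : String) (r : Nat) (L : String) (ps : List String)
    (rest : List (String × Nat × String)) (h : ∀ e ∈ rest, r ≤ e.2.1) :
    ((ps.map (fun p => (p, r, L))) ++ rest).foldl (pvStep tl) none
      = if ps.any (fun p => PySem.Str.isIn p tl) then some (r, L)
        else rest.foldl (pvStep tl) none := by
  induction ps with
  | nil => simp
  | cons p t ih =>
    simp only [List.map_cons, List.cons_append, List.foldl_cons, List.any_cons]
    by_cases hp : PySem.Chars.isIn p.toList tl.toList = true
    · have hs : pvStep tl none (p, r, L) = some (r, L) := by simp [pvStep, hp]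
      rw [hs, pvStep_skip]
      · simp [hp]
      · intro e he
        rcases List.mem_append.mp he with h1 | h2
        · obtain ⟨q, _, rfl⟩ := List.mem_map.mp h1; exact le_refl r
        · exact h e h2
    · have hs : pvStep tl none (p, r, L) = none := by simp [pvStep, hp]
      rw [hs, ih]
      simp [hp]

theorem pvCore (tl : String) (dflt : Option String) :
    (match pvFlatTable.foldl (pvStep tl) none with
      | some bp => some bp.2
      | none => dflt) =
    (match pvScanA tl ["Ia", "Ib", "IIa", "IIb", "III", "IV"] with
      | some level => some level
      | none => dflt) := by
  have e0 : pvHit tl "Ia" = (["meta-analysis", "systematic review", "cochrane"].any (fun p => PySem.Str.isIn p tl)) := rfl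
  have e1 : pvHit tl "Ib" = (["randomized controlled trial", "rct", "double-blind", "placebo-controlled"].any (fun p => PySem.Str.isIn p tl)) := rfl
  have e2 : pvHit tl "IIa" = (["prospective cohort", "controlled trial without randomization"].any (fun p => PySem.Str.isIn p tl)) := rfl
  have e3 : pvHit tl "IIb" = (["cohort study", "case-control", "retrospective cohort"].any (fun p => PySem.Str.isIn p tl)) := rfl
  have e4 : pvHit tl "III" = (["case series", "comparative study", "observational"].any (fun p => PySem.Str.isIn p tl)) := rfl
  have e5 : pvHit tl "IV" = (["case report", "expert opinion", "editorial", "review article"].any (fun p => PySem.Str.isIn p tl)) := rfl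
  have htab : pvFlatTable =
      (["meta-analysis", "systematic review", "cochrane"].map (fun p => (p, 0, "Ia"))) ++
      ((["randomized controlled trial", "rct", "double-blind", "placebo-controlled"].map (fun p => (p, 1, "Ib"))) ++
      ((["prospective cohort", "controlled trial without randomization"].map (fun p => (p, 2, "IIa"))) ++
      ((["cohort study", "case-control", "retrospective cohort"].map (fun p => (p, 3, "IIb"))) ++
      ((["case series", "comparative study", "observational"].map (fun p => (p, 4, "III"))) ++
      ((["case report", "expert opinion", "editorial", "review article"].map (fun p => (p, 5, "IV"))) ++ []))))) := by
    simp [pvFlatTable]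
  rw [htab,
    pvGroupFold tl 0 "Ia" _ _ (by decide),
    pvGroupFold tl 1 "Ib" _ _ (by decide),
    pvGroupFold tl 2 "IIa" _ _ (by decide),
    pvGroupFold tl 3 "IIb" _ _ (by decide),
    pvGroupFold tl 4 "III" _ _ (by decide),
    pvGroupFold tl 5 "IV" _ _ (by decide),
    ← e0, ← e1, ← e2, ← e3, ← e4, ← e5]
  by_cases h0 : pvHit tl "Ia" = true <;>
  by_cases h1 : pvHit tl "Ib" = true <;>
  by_cases h2 : pvHit tl "IIa" = true <;>
  by_cases h3 : pvHit tl "IIb" = true <;>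
  by_cases h4 : pvHit tl "III" = true <;>
  by_cases h5 : pvHit tl "IV" = true <;>
  simp [pvScanA, h0, h1, h2, h3, h4, h5]

-- ===== VERDICT (by name: the statement is the Claim_ definition above) =====
theorem detect_evidence_level_py_spec : Claim_equal_detect_evidence_level_py := by
  intro text document_type _
  unfold Spec_detect_evidence_level_py detect_evidence_level_py detect_evidence_level_py_alt
  by_cases hd : (document_type == "journal_article" || document_type == "review" || document_type == "case_series") = true
  · simp only [hd, Bool.not_true, Bool.false_eq_true, if_false]
    exact (pvCore (PySem.Str.lower text) _).symm
  · simp at hd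
    simp [hd]
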